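-- pv_equiv track=rewrite | github.com/pypi-data/pypi-mirror-340 | packages/nk10/nk10-1.0.1.tar.gz/nk10-1.0.1/nk10.py | encode_nk10
-- ===== SOURCE A (Python) =====
-- BASE_10KN = 10000
--
-- HANGUL_OFFSET = 0xAC00  # '가' = 0
--
-- def encode_nk10(n: int) -> str:
--     if n == 0:
--         return chr(HANGUL_OFFSET)
--     result = []
--     while n > 0:
--         digit = n % BASE_10KN
--         ch = chr(HANGUL_OFFSET + digit)
--         result.insert(0, ch)
--         n //= BASE_10KN
--     return ''.join(result)
-- ===== SOURCE B (Python) =====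
-- BASE_10KN = 10000
-- HANGUL_OFFSET = 0xAC00
--
-- def encode_nk10(n: int) -> str:
--     if n == 0:
--         return chr(HANGUL_OFFSET)
--     if n < 0:
--         return ''
--     def highest(m):
--         # largest power of BASE_10KN that is <= m (m >= 1)
--         return 1 if m < BASE_10KN else BASE_10KN * highest(m // BASE_10KN)
--     p = highest(n)
--     out = []
--     while p > 0:
--         out.append(chr(HANGUL_OFFSET + (n // p) % BASE_10KN))
--         p //= BASE_10KN
--     return ''.join(out)
-- ===== Notes on version B (the rewrite author's own statement) =====
-- stated objective: alternative
-- what changed: Instead of A's least-significant-first while-loop that prepends each digit with list.insert(0, ...), B first computes the highest power of the base that does not exceed n and then emits digits most-significant-first by dividing by descending powers, appending to the output; the zero/negative guards are kept.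
import Mathlib
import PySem

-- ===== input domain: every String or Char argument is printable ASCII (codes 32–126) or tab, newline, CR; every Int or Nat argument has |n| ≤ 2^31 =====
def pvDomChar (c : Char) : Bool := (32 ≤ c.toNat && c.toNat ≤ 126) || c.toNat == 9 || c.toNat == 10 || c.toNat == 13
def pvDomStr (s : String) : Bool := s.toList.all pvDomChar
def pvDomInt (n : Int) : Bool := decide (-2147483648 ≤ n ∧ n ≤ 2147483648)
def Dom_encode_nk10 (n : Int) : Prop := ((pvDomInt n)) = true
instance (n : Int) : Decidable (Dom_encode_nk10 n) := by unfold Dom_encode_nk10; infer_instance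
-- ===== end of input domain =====

-- B replaces A's LSB-first while-loop with insert(0, ch) by a power-search plus an
-- MSB-first digit-emission loop that appends; objective: alternative (same cost class).

-- ===== PORT A =====
-- while n > 0: digit = n % 10000; result.insert(0, chr(0xAC00+digit)); n //= 10000
def encodeLoopA (n : Int) (result : List Char) : List Char :=
  if 0 < n then
    encodeLoopA (PySem.Int.floordiv n 10000)
      (Char.ofNat (0xAC00 + (PySem.Int.mod n 10000)).toNat :: result)
  else result
termination_by n.toNat
decreasing_by
  have h : PySem.Int.floordiv n 10000 = n / 10000 :=
    PySem.Int.floordiv_eq_ediv_of_pos (by decide)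
  rw [h]; omega

def encode_nk10 (n : Int) : String :=
  if n = 0 then String.ofList [Char.ofNat 0xAC00]
  else String.ofList (encodeLoopA n [])

-- ===== PORT B =====
-- highest(m) = 1 if m < BASE else BASE * highest(m // BASE)
def highestB (m : Int) : Int :=
  if m < 10000 then 1
  else 10000 * highestB (PySem.Int.floordiv m 10000)
termination_by m.toNat
decreasing_by
  have h : PySem.Int.floordiv m 10000 = m / 10000 :=
    PySem.Int.floordiv_eq_ediv_of_pos (by decide)
  rw [h]; omega

-- while p > 0: out.append(chr(0xAC00 + (n // p) % 10000)); p //= 10000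
def emitB (n p : Int) : List Char :=
  if 0 < p then
    Char.ofNat (0xAC00 + PySem.Int.mod (PySem.Int.floordiv n p) 10000).toNat
      :: emitB n (PySem.Int.floordiv p 10000)
  else []
termination_by p.toNat
decreasing_by
  have h : PySem.Int.floordiv p 10000 = p / 10000 :=
    PySem.Int.floordiv_eq_ediv_of_pos (by decide)
  rw [h]; omega

def encode_nk10_alt (n : Int) : String :=
  if n = 0 then String.ofList [Char.ofNat 0xAC00]
  else if n < 0 then ""
  else String.ofList (emitB n (highestB n))

-- ===== PRECONDITION & SPEC =====
def Spec_encode_nk10 (n : Int) (out : String) : Prop := out = encode_nk10_alt n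
instance (n : Int) (out : String) : Decidable (Spec_encode_nk10 n out) := by unfold Spec_encode_nk10; infer_instance

-- ===== CLAIM =====
def Claim_equal_encode_nk10 : Prop := ∀ (n : Int), Dom_encode_nk10 n → Spec_encode_nk10 n (encode_nk10 n)

-- ===== LEMMAS AND PROOFS =====

-- canonical digit list, LSB last, via Euclidean div/mod (equal to floor div/mod for positives)
def digitsD (n : Int) : List Char :=
  if n ≤ 0 then []
  else digitsD (n / 10000) ++ [Char.ofNat (0xAC00 + n % 10000).toNat]
termination_by n.toNat
decreasing_by omega

-- (k+1)-digit zero-padded list of n, MSB first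
def padD (n : Int) : Nat → List Char
  | 0 => [Char.ofNat (0xAC00 + n % 10000).toNat]
  | k + 1 => Char.ofNat (0xAC00 + (n / 10000 ^ (k + 1)) % 10000).toNat :: padD n k

theorem encodeLoopA_eq_digitsD (K : Nat) (n : Int) (acc : List Char)
    (hK : n.toNat ≤ K) (hn : 0 < n) :
    encodeLoopA n acc = digitsD n ++ acc := by
  induction K generalizing n acc with
  | zero => omega
  | succ K ih =>
    rw [encodeLoopA, digitsD]
    have hq : PySem.Int.floordiv n 10000 = n / 10000 :=
      PySem.Int.floordiv_eq_ediv_of_pos (by decide)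
    have hm : PySem.Int.mod n 10000 = n % 10000 :=
      PySem.Int.mod_eq_emod_of_pos (by decide)
    simp only [if_pos hn, if_neg (by omega : ¬ n ≤ 0), hq, hm]
    by_cases hq0 : 0 < n / 10000
    · rw [ih (n / 10000) _ (by omega) hq0]; simp
    · have hz : n / 10000 = 0 := by omega
      rw [hz, encodeLoopA, digitsD]; simp

theorem emitB_pow (n : Int) (k : Nat) :
    emitB n (10000 ^ k) = padD n k := by
  induction k with
  | zero =>
    rw [pow_zero, emitB, if_pos (by decide : (0:Int) < 1)]
    have h1 : PySem.Int.floordiv n 1 = n :=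
      (PySem.Int.floordiv_eq_ediv_of_pos (by decide)).trans (Int.ediv_one n)
    have h3 : PySem.Int.floordiv 1 10000 = 0 :=
      PySem.Int.floordiv_eq_ediv_of_pos (by decide)
    rw [h1, h3, emitB, if_neg (by decide : ¬ (0:Int) < 0),
        PySem.Int.mod_eq_emod_of_pos (by decide)]
    rfl
  | succ k ih =>
    have hpow : (0:Int) < 10000 ^ (k + 1) := by positivity
    rw [emitB, if_pos hpow]
    have hdiv : PySem.Int.floordiv ((10000:Int) ^ (k + 1)) 10000 = 10000 ^ k := by
      rw [PySem.Int.floordiv_eq_ediv_of_pos (by decide), pow_succ,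
        Int.mul_ediv_cancel _ (by decide)]
    have hfd : PySem.Int.floordiv n (10000 ^ (k + 1)) = n / 10000 ^ (k + 1) :=
      PySem.Int.floordiv_eq_ediv_of_pos hpow
    have hmd : PySem.Int.mod (n / 10000 ^ (k + 1)) 10000 = (n / 10000 ^ (k + 1)) % 10000 :=
      PySem.Int.mod_eq_emod_of_pos (by decide)
    rw [hdiv, ih, hfd, hmd, padD]

theorem padD_shift (n : Int) (k : Nat) :
    padD n (k + 1) = padD (n / 10000) k ++ [Char.ofNat (0xAC00 + n % 10000).toNat] := by
  induction k with
  | zero =>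
    simp [padD, pow_one]
  | succ k ih =>
    have hc : n / 10000 ^ (k + 2) = (n / 10000) / 10000 ^ (k + 1) := by
      rw [pow_succ']
      exact (Int.ediv_ediv_of_nonneg (by decide)).symm
    calc padD n (k + 2)
        = Char.ofNat (0xAC00 + (n / 10000 ^ (k + 2)) % 10000).toNat :: padD n (k + 1) := rfl
      _ = Char.ofNat (0xAC00 + ((n / 10000) / 10000 ^ (k + 1)) % 10000).toNat
            :: (padD (n / 10000) k ++ [Char.ofNat (0xAC00 + n % 10000).toNat]) := by
          rw [hc, ih]
      _ = padD (n / 10000) (k + 1) ++ [Char.ofNat (0xAC00 + n % 10000).toNat] := rfl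

theorem padD_eq_digitsD (k : Nat) (n : Int)
    (hlo : 10000 ^ k ≤ n) (hhi : n < 10000 ^ (k + 1)) :
    padD n k = digitsD n := by
  induction k generalizing n with
  | zero =>
    simp only [pow_zero] at hlo
    rw [digitsD, if_neg (by omega)]
    have hz : n / 10000 = 0 := by
      rw [Int.ediv_eq_zero_of_lt (by omega) (by simpa [pow_one] using hhi)]
    rw [hz, digitsD]
    simp [padD]
  | succ k ih =>
    have hn : 0 < n := lt_of_lt_of_le (by positivity) hlo
    have hqlo : 10000 ^ k ≤ n / 10000 := by
      rw [Int.le_ediv_iff_mul_le (by decide), ← pow_succ]; exact hlo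
    have hqhi : n / 10000 < 10000 ^ (k + 1) := by
      rw [Int.ediv_lt_iff_lt_mul (by decide), ← pow_succ]; exact hhi
    rw [padD_shift, ih _ hqlo hqhi]
    conv_rhs => rw [digitsD, if_neg (by omega : ¬ n ≤ 0)]

theorem highestB_spec (K : Nat) (n : Int) (hK : n.toNat ≤ K) (hn : 0 < n) :
    ∃ k : Nat, highestB n = 10000 ^ k ∧ 10000 ^ k ≤ n ∧ n < 10000 ^ (k + 1) := by
  induction K generalizing n with
  | zero => omega
  | succ K ih =>
    rw [highestB]
    by_cases hs : n < 10000
    · exact ⟨0, by rw [if_pos hs, pow_zero], by simpa using hn, by simpa [pow_one] using hs⟩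
    · have hq : PySem.Int.floordiv n 10000 = n / 10000 :=
        PySem.Int.floordiv_eq_ediv_of_pos (by decide)
      have hq1 : 0 < n / 10000 := by
        have := Int.le_ediv_iff_mul_le (a := 1) (b := n) (c := 10000) (by decide)
        omega
      obtain ⟨k, hk, hlo, hhi⟩ := ih (n / 10000) (by omega) hq1
      refine ⟨k + 1, ?_, ?_, ?_⟩
      · rw [if_neg hs, hq, hk, pow_succ']
      · rw [pow_succ']
        calc (10000:Int) * 10000 ^ k ≤ 10000 * (n / 10000) := by
              exact mul_le_mul_of_nonneg_left hlo (by decide)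
          _ ≤ n := by
              rw [mul_comm]; exact Int.ediv_mul_le n (by decide)
      · have : n < (n / 10000 + 1) * 10000 := Int.lt_ediv_add_one_mul_self n (by decide)
        calc n < (n / 10000 + 1) * 10000 := this
          _ ≤ 10000 ^ (k + 1) * 10000 := by
              exact mul_le_mul_of_nonneg_right (by omega) (by decide)
          _ = 10000 ^ (k + 2) := by ring

-- ===== VERDICT =====
theorem encode_nk10_spec : Claim_equal_encode_nk10 := by
  intro n _
  unfold Spec_encode_nk10 encode_nk10 encode_nk10_alt
  by_cases h0 : n = 0
  · simp [h0]
  · simp only [if_neg h0]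
    by_cases hneg : n < 0
    · rw [if_pos hneg, encodeLoopA, if_neg (show ¬ (0:Int) < n by omega)]
    · rw [if_neg hneg]
      have hn : 0 < n := by omega
      obtain ⟨k, hk, hlo, hhi⟩ := highestB_spec n.toNat n le_rfl hn
      rw [hk, emitB_pow, padD_eq_digitsD k n hlo hhi,
        encodeLoopA_eq_digitsD n.toNat n [] le_rfl hn]
      simp
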